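-- pv_equiv track=rewrite | github.com/RemiErr/2026-python | weeks/week-07/solutions/1111405012/question-10101-test.py | same_shape
-- ===== SOURCE A (Python) =====
-- def same_shape(original: str, changed: str) -> bool:
--     left = original.split("#", 1)[0]
--     right = changed.split("#", 1)[0]
--     if len(left) != len(right):
--         return False
--     for old_ch, new_ch in zip(left, right):
--         if old_ch.isdigit() != new_ch.isdigit():
--             return False
--         if not old_ch.isdigit() and old_ch != new_ch:
--             return False
--     return changed.endswith("#")
-- ===== SOURCE B (Python) =====
-- def same_shape(original: str, changed: str) -> bool:
--     def norm(s: str) -> str: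
--         return "".join("0" if c.isdigit() else c for c in s.split("#", 1)[0])
--     return norm(original) == norm(changed) and changed.endswith("#")
-- ===== Notes on version B (the rewrite author's own statement) =====
-- stated objective: simpler
-- what changed: Replaces the length check plus pairwise early-exit zip loop with normalizing each '#'-prefix into a canonical shape string (every digit mapped to '0') and comparing the two normal forms as wholes.
import Mathlib
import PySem

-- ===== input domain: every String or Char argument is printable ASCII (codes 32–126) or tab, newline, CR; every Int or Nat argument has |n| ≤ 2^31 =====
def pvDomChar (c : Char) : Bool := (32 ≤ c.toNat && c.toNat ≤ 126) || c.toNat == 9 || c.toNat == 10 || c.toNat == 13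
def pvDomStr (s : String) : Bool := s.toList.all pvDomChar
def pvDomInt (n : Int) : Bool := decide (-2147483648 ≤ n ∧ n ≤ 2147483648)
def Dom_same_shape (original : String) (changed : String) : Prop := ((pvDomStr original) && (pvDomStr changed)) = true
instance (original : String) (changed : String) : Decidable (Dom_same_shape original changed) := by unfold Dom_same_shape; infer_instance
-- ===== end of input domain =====

-- B replaces A's length check + pairwise early-exit zip loop with a normalize-then-compare
-- decomposition (each '#'-prefix canonicalized by mapping digits to '0'); objective: simpler.


-- ===== PORT A =====
-- s.split("#", 1)[0], shared verbatim by both Pythons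
def pvPrefix (s : String) : List Char :=
  (PySem.Chars.splitOnMax s.toList ['#'] 1).headD []

-- A's zip loop with its two early-return tests, in source order; t is the value of the
-- trailing 'return changed.endswith("#")'
def pvLoopA : List (Char × Char) → Bool → Bool
  | [], t => t
  | (o, n) :: rest, t =>
    if (PySem.Chars.isdigit o != PySem.Chars.isdigit n) then false
    else if (!PySem.Chars.isdigit o && o != n) then false
    else pvLoopA rest t

def same_shape (original : String) (changed : String) : Bool :=
  let left := pvPrefix original
  let right := pvPrefix changed
  if left.length ≠ right.length then false
  else pvLoopA (left.zip right) (PySem.Str.endswith changed "#")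

-- ===== PORT B =====
-- '0' if c.isdigit() else c
def pvShapeChar (c : Char) : Char :=
  if PySem.Chars.isdigit c then '0' else c

-- ''.join('0' if c.isdigit() else c for c in s.split('#',1)[0])
def pvNorm (s : String) : List Char := (pvPrefix s).map pvShapeChar

def same_shape_alt (original : String) (changed : String) : Bool :=
  (pvNorm original == pvNorm changed) && PySem.Str.endswith changed "#"

-- ===== PRECONDITION & SPEC =====
def Spec_same_shape (original : String) (changed : String) (out : Bool) : Prop := out = same_shape_alt original changed
instance (original : String) (changed : String) (out : Bool) : Decidable (Spec_same_shape original changed out) := by unfold Spec_same_shape; infer_instance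

-- ===== CLAIM (what is proved, stated in full; the proofs are below) =====
def Claim_equal_same_shape : Prop := ∀ (original : String) (changed : String), Dom_same_shape original changed → Spec_same_shape original changed (same_shape original changed)

-- ===== LEMMAS AND PROOFS =====
lemma shapeChar_eq_iff (a b : Char) :
    pvShapeChar a = pvShapeChar b ↔
      (PySem.Chars.isdigit a = PySem.Chars.isdigit b ∧
        (PySem.Chars.isdigit a = true ∨ a = b)) := by
  have h0 : PySem.Chars.isdigit '0' = true := by decide
  unfold pvShapeChar
  split_ifs with ha hb hb
  · simp [ha, hb]
  · constructor
    · intro h; exact absurd (h ▸ h0) (by simp [hb])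
    · rintro ⟨h1, _⟩; rw [ha] at h1; exact absurd h1.symm (by simp [hb])
  · constructor
    · intro h; exact absurd (h.symm ▸ h0) (by simp [ha])
    · rintro ⟨h1, h2⟩
      · rcases h2 with h2 | h2
        · exact absurd h2 (by simp [ha])
        · subst h2; exact absurd hb (by simp [ha])
  · constructor
    · intro h
      refine ⟨by simp [ha, hb], Or.inr h⟩
    · rintro ⟨_, h2 | h2⟩
      · exact absurd h2 (by simp [ha])
      · exact h2

lemma loopA_eq (l : List Char) : ∀ (r : List Char) (t : Bool),
    (if l.length ≠ r.length then false else pvLoopA (l.zip r) t)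
      = ((l.map pvShapeChar == r.map pvShapeChar) && t) := by
  induction l with
  | nil =>
    intro r t
    cases r with
    | nil => simp [pvLoopA]
    | cons b r' => simp
  | cons a l' ih =>
    intro r t
    cases r with
    | nil => simp
    | cons b r' =>
      simp only [List.zip_cons_cons, List.length_cons, List.map_cons, List.cons_beq_cons]
      by_cases hsc : pvShapeChar a = pvShapeChar b
      · obtain ⟨hd, hrest⟩ := (shapeChar_eq_iff a b).mp hsc
        have hA : pvLoopA ((a, b) :: l'.zip r') t = pvLoopA (l'.zip r') t := by
          rcases hrest with h1 | h2
          · have hb : PySem.Chars.isdigit b = true := hd ▸ h1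
            simp [pvLoopA, hd, hb]
          · subst h2; simp [pvLoopA]
        by_cases hl : l'.length = r'.length
        · have hi := ih r' t
          simp only [ne_eq, hl, not_true_eq_false, if_false] at hi
          simp [hl, hA, hi, hsc]
        · have hm : (List.map pvShapeChar l' == List.map pvShapeChar r') = false := by
            refine beq_eq_false_iff_ne.mpr fun h => hl ?_
            simpa using congrArg List.length h
          simp [hl, hm]
      · have hscb : (pvShapeChar a == pvShapeChar b) = false := beq_eq_false_iff_ne.mpr hsc
        have hA : pvLoopA ((a, b) :: l'.zip r') t = false := by
          by_cases hd : PySem.Chars.isdigit a = PySem.Chars.isdigit b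
          · have hno : ¬(PySem.Chars.isdigit a = true ∨ a = b) := fun h =>
              hsc ((shapeChar_eq_iff a b).mpr ⟨hd, h⟩)
            have h1 : PySem.Chars.isdigit a = false := by
              cases hx : PySem.Chars.isdigit a with
              | false => rfl
              | true => exact absurd (Or.inl hx) hno
            have h2 : a ≠ b := fun h => hno (Or.inr h)
            have hb1 : PySem.Chars.isdigit b = false := hd ▸ h1
            simp [pvLoopA, hd, hb1, h2]
          · simp [pvLoopA, hd]
        by_cases hl : l'.length = r'.length <;> simp [hl, hA, hscb]

-- ===== VERDICT (by name: the statement is the Claim_ definition above) =====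
theorem same_shape_spec : Claim_equal_same_shape := by
  intro original changed _
  unfold Spec_same_shape same_shape same_shape_alt pvNorm
  exact loopA_eq (pvPrefix original) (pvPrefix changed) (PySem.Str.endswith changed "#")
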